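-- pv_equiv track=rewrite | github.com/edaarslan7/Bioinformatic | bio_cal_10.py | numbertopattern
-- ===== SOURCE A (Python) =====
-- def numbertosymbol(index):
--     if(index==0):
--         return 'A'
--     elif(index==1):
--         return 'C'
--     elif(index==2):
--         return 'G'
--     else:
--         return 'T'
--
-- def quotient(index,a):
--     a = 4
--     return index//a
--
-- def remainder(index,a):
--     a = 4
--     return index%a
--
-- def numbertopattern(index,k):
--     if(k==1):
--         return numbertosymbol(index)
--     prefixindex = quotient(index,4)
--     r = remainder(index,4)
--     symbol = numbertosymbol(r)
--     prefixpattern = numbertopattern(prefixindex,k-1)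
--     return (prefixpattern + symbol)
-- ===== SOURCE B (Python) =====
-- def numbertopattern(index, k):
--     pattern = []
--     for _ in range(k):
--         pattern.append('ACGT'[index % 4])
--         index //= 4
--     return ''.join(reversed(pattern))
-- ===== Notes on version B (the rewrite author's own statement) =====
-- stated objective: simpler
-- what changed: Replaced the recursion on k with a plain iterative base-4 digit loop over an 'ACGT' lookup string joined once at the end; Pre_ excludes k <= 0, on which A's recursion never reaches its base case and raises RecursionError.
-- intended difference: When index // 4**(k-1) lies outside 0..3 and its residue mod 4 is not 3 (index does not encode a length-k pattern), A maps the whole oversized or negative leading quotient through its catch-all branch to 'T', while B takes every digit mod 4 (the pattern of index mod 4**k), the standard convention for a base-4 converter. — e.g. on numbertopattern(4, 1): A returns "T", B returns "A"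
import Mathlib
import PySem

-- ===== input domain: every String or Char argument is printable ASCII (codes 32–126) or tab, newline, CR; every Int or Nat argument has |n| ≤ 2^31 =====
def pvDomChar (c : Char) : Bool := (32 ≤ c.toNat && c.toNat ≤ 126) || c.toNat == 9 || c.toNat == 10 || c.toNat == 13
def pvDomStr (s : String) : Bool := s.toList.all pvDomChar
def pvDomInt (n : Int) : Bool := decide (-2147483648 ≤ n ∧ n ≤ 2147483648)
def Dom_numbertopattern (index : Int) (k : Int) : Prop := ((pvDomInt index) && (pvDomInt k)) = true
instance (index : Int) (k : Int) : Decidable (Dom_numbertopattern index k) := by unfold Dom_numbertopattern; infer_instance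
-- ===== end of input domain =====

-- B replaces A's recursion with a plain iterative base-4 digit loop over an 'ACGT' lookup string (objective: simpler); they differ only on the D_ corner where the index does not encode a length-k pattern.

-- ===== PORT A =====
def numbertosymbol (index : Int) : String :=
  if index == 0 then "A"
  else if index == 1 then "C"
  else if index == 2 then "G"
  else "T"

def pvQuotient (index : Int) (a : Int) : Int :=
  PySem.Int.floordiv index 4   -- quotient(index, a): the body overwrites a with 4

def pvRemainder (index : Int) (a : Int) : Int :=
  PySem.Int.mod index 4        -- remainder(index, a): the body overwrites a with 4

-- fuel = k.toNat; fuel 0 is only reached when k ≤ 0, where Python raises RecursionError (excluded by Pre_)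
def numbertopatternGo (fuel : Nat) (index : Int) (k : Int) : String :=
  match fuel with
  | 0 => ""
  | fuel + 1 =>
    if k == 1 then numbertosymbol index
    else
      let prefixindex := pvQuotient index 4
      let r := pvRemainder index 4
      let symbol := numbertosymbol r
      let prefixpattern := numbertopatternGo fuel prefixindex (k - 1)
      prefixpattern ++ symbol

def numbertopattern (index : Int) (k : Int) : String :=
  numbertopatternGo k.toNat index k

-- ===== PORT B =====
-- 'ACGT'[index % 4]  (index % 4 is always in range for the positive divisor 4, so the getD default is never used)
def pvLookup (d : Int) : Char :=
  (PySem.Chars.pyGet? "ACGT".toList d).getD 'A'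

def numbertopattern_alt (index : Int) (k : Int) : String :=
  let st := (List.range k.toNat).foldl
    (fun (st : Int × List Char) _ =>
      (PySem.Int.floordiv st.1 4, st.2 ++ [pvLookup (PySem.Int.mod st.1 4)]))
    (index, [])
  String.ofList st.2.reverse

-- ===== PRECONDITION & SPEC =====
-- Pre_ excludes k ≤ 0, on which Python A raises RecursionError (the recursion on k-1 never reaches the k==1 base case).
def Pre_numbertopattern (index : Int) (k : Int) : Prop := 1 ≤ k
instance (index : Int) (k : Int) : Decidable (Pre_numbertopattern index k) := by unfold Pre_numbertopattern; infer_instance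

def pvWitness_numbertopattern : Int × Int := (11, 3)

-- When index // 4^(k-1) lies outside 0..3 and its residue mod 4 is not 3 (index does not encode a length-k pattern),
-- A maps the whole oversized or negative leading quotient through its catch-all branch to 'T', while B takes every digit
-- mod 4 (the pattern of index mod 4^k), the standard convention for a base-4 converter.
def D_numbertopattern (index : Int) (k : Int) : Prop :=
  1 ≤ k ∧
  (PySem.Int.floordiv index (4 ^ (k - 1).toNat) < 0 ∨ 4 ≤ PySem.Int.floordiv index (4 ^ (k - 1).toNat)) ∧
  PySem.Int.mod (PySem.Int.floordiv index (4 ^ (k - 1).toNat)) 4 ≠ 3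
instance (index : Int) (k : Int) : Decidable (D_numbertopattern index k) := by unfold D_numbertopattern; infer_instance

def Spec_numbertopattern (index : Int) (k : Int) (out : String) : Prop := ¬ D_numbertopattern index k → out = numbertopattern_alt index k
instance (index : Int) (k : Int) (out : String) : Decidable (Spec_numbertopattern index k out) := by unfold Spec_numbertopattern; infer_instance

def pvDiffWitness_numbertopattern : Int × Int := (4, 1)
def pvDiffWitnessOut_numbertopattern : String × String := ("T", "A")

-- ===== CLAIM (what is proved, stated in full; the proofs are below) =====
def Claim_unchanged_numbertopattern : Prop := ∀ (index : Int) (k : Int), Dom_numbertopattern index k → Pre_numbertopattern index k → Spec_numbertopattern index k (numbertopattern index k)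
def Claim_changed_numbertopattern : Prop := Dom_numbertopattern (pvDiffWitness_numbertopattern.1) (pvDiffWitness_numbertopattern.2) ∧ Pre_numbertopattern (pvDiffWitness_numbertopattern.1) (pvDiffWitness_numbertopattern.2) ∧ D_numbertopattern (pvDiffWitness_numbertopattern.1) (pvDiffWitness_numbertopattern.2) ∧ numbertopattern (pvDiffWitness_numbertopattern.1) (pvDiffWitness_numbertopattern.2) = pvDiffWitnessOut_numbertopattern.1 ∧ numbertopattern_alt (pvDiffWitness_numbertopattern.1) (pvDiffWitness_numbertopattern.2) = pvDiffWitnessOut_numbertopattern.2 ∧ pvDiffWitnessOut_numbertopattern.1 ≠ pvDiffWitnessOut_numbertopattern.2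
def Claim_exact_numbertopattern : Prop := ∀ (index : Int) (k : Int), Dom_numbertopattern index k → Pre_numbertopattern index k → D_numbertopattern index k → numbertopattern index k ≠ numbertopattern_alt index k

-- ===== LEMMAS AND PROOFS =====

-- raw iterates index, index//4, (index//4)//4, …  (n of them)
def pvRaw (index : Int) : Nat → List Int
  | 0 => []
  | n + 1 => index :: pvRaw (PySem.Int.floordiv index 4) n

-- index //4 //4 … //4, n times
def pvIter (index : Int) : Nat → Int
  | 0 => index
  | n + 1 => pvIter (PySem.Int.floordiv index 4) n

-- the char numbertosymbol returns
def pvSymA (d : Int) : Char :=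
  if d = 0 then 'A' else if d = 1 then 'C' else if d = 2 then 'G' else 'T'

lemma pvIter_eq (n : Nat) : ∀ index : Int, pvIter index n = PySem.Int.floordiv index (4 ^ n) := by
  induction n with
  | zero =>
    intro index
    rw [pow_zero, PySem.Int.floordiv_eq_ediv_of_pos (by omega)]
    simp [pvIter]
  | succ n ih =>
    intro index
    have h4n : (0:Int) < 4 ^ n := by positivity
    have h4n1 : (0:Int) < 4 ^ (n + 1) := by positivity
    rw [pvIter, ih]
    rw [PySem.Int.floordiv_eq_ediv_of_pos h4n, PySem.Int.floordiv_eq_ediv_of_pos h4n1,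
        PySem.Int.floordiv_eq_ediv_of_pos (show (0:Int) < 4 by omega)]
    rw [Int.ediv_ediv_of_nonneg (show (0:Int) ≤ 4 by omega), ← pow_succ']

lemma pvRaw_snoc (n : Nat) : ∀ index : Int, pvRaw index (n + 1) = pvRaw index n ++ [pvIter index n] := by
  induction n with
  | zero => intro index; simp [pvRaw, pvIter]
  | succ n ih => intro index; rw [pvRaw, ih, pvRaw, pvIter]; simp

lemma symA_toList (d : Int) : (numbertosymbol d).toList = [pvSymA d] := by
  unfold numbertosymbol pvSymA
  by_cases h0 : d = 0
  · subst h0; decide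
  by_cases h1 : d = 1
  · subst h1; decide
  by_cases h2 : d = 2
  · subst h2; decide
  · simp only [beq_iff_eq, if_neg h0, if_neg h1, if_neg h2]; decide

lemma mod4_bounds (x : Int) : 0 ≤ PySem.Int.mod x 4 ∧ PySem.Int.mod x 4 < 4 := by
  rw [PySem.Int.mod_eq_emod_of_pos (by omega)]
  constructor
  · exact Int.emod_nonneg x (by omega)
  · exact Int.emod_lt_of_pos x (by omega)

lemma symA_eq_lookup (d : Int) (h0 : 0 ≤ d) (h4 : d < 4) : pvSymA d = pvLookup d := by
  interval_cases d <;> decide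

-- A's result as a list of chars: digit chars of the n low digits, then the catch-all symbol of the remaining quotient, reversed
lemma a_data (n : Nat) : ∀ (index k : Int), k = (n : Int) + 1 →
    (numbertopatternGo k.toNat index k).toList =
      ((pvRaw index n).map (fun x => pvSymA (PySem.Int.mod x 4)) ++ [pvSymA (pvIter index n)]).reverse := by
  induction n with
  | zero =>
    intro index k hk
    have : k = 1 := by omega
    subst this
    simp [numbertopatternGo, pvRaw, pvIter, symA_toList]
  | succ n ih =>
    intro index k hk
    have hk2 : k.toNat = n + 2 := by omega
    have hne : ¬ (k == 1) = true := by simp; omega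
    have hk1 : k - 1 = (n : Int) + 1 := by omega
    have hfuel : (k - 1).toNat = n + 1 := by omega
    rw [hk2]
    conv_lhs => rw [numbertopatternGo]
    rw [if_neg hne]
    simp only [pvQuotient, pvRemainder]
    rw [String.toList_append, symA_toList]
    have hih := ih (PySem.Int.floordiv index 4) (k - 1) hk1
    rw [hfuel] at hih
    rw [hih]
    simp [pvRaw, pvIter]

-- B's fold accumulates the lookup chars of the raw iterates taken mod 4
lemma b_fold (n : Nat) : ∀ (index : Int) (acc : List Char),
    (List.range n).foldl
      (fun (st : Int × List Char) _ =>
        (PySem.Int.floordiv st.1 4, st.2 ++ [pvLookup (PySem.Int.mod st.1 4)]))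
      (index, acc) =
    (pvIter index n, acc ++ (pvRaw index n).map (fun x => pvLookup (PySem.Int.mod x 4))) := by
  induction n with
  | zero => intro index acc; simp [pvIter, pvRaw]
  | succ n ih =>
    intro index acc
    rw [List.range_succ_eq_map]
    simp only [List.foldl_cons, List.foldl_map]
    rw [ih]
    simp [pvIter, pvRaw]

lemma b_data (index : Int) (k : Int) (n : Nat) (hk : k.toNat = n) :
    (numbertopattern_alt index k).toList =
      ((pvRaw index n).map (fun x => pvLookup (PySem.Int.mod x 4))).reverse := by
  unfold numbertopattern_alt
  rw [hk, b_fold]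
  simp

-- ===== VERDICT (by name: the statements are the Claim_ definitions above) =====
theorem numbertopattern_spec : Claim_unchanged_numbertopattern := by
  intro index k _ hpre
  unfold Spec_numbertopattern
  intro hnd
  have hpre' : 1 ≤ k := hpre
  have hk : k = (((k - 1).toNat : Nat) : Int) + 1 := by omega
  have hk2 : k.toNat = (k - 1).toNat + 1 := by omega
  apply String.toList_inj.mp
  unfold numbertopattern
  rw [a_data (k - 1).toNat index k hk]
  rw [b_data index k ((k - 1).toNat + 1) hk2]
  rw [pvRaw_snoc, List.map_append]
  congr 2
  · apply List.map_congr_left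
    intro x _
    exact symA_eq_lookup _ (mod4_bounds x).1 (mod4_bounds x).2
  · simp only [List.map_cons, List.map_nil]
    congr 1
    set q := pvIter index (k - 1).toNat with hq
    have hqe : q = PySem.Int.floordiv index (4 ^ (k - 1).toNat) := by rw [hq, pvIter_eq]
    unfold D_numbertopattern at hnd
    rw [← hqe] at hnd
    push Not at hnd
    by_cases hin : 0 ≤ q ∧ q < 4
    · have hmod : PySem.Int.mod q 4 = q := by
        rw [PySem.Int.mod_eq_emod_of_pos (by omega)]
        exact Int.emod_eq_of_lt hin.1 hin.2
      rw [hmod]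
      exact symA_eq_lookup q hin.1 hin.2
    · have h3 : PySem.Int.mod q 4 = 3 := by
        rcases hin with h
        have := hnd hpre'
        by_cases hlt : q < 0
        · exact this (Or.inl hlt)
        · exact this (Or.inr (by omega))
      rw [h3]
      have hne : ¬ (q = 0 ∨ q = 1 ∨ q = 2) := by omega
      unfold pvSymA
      rw [if_neg (by tauto), if_neg (by tauto), if_neg (by tauto)]
      decide

theorem numbertopattern_changed : Claim_changed_numbertopattern := by
  unfold Claim_changed_numbertopattern; decide

theorem numbertopattern_tight : Claim_exact_numbertopattern := by
  intro index k _ hpre hd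
  obtain ⟨hk1, hout, hm3⟩ := hd
  intro heq
  have hk : k = (((k - 1).toNat : Nat) : Int) + 1 := by omega
  have hk2 : k.toNat = (k - 1).toNat + 1 := by omega
  have hlist := congrArg String.toList heq
  unfold numbertopattern at hlist
  rw [a_data (k - 1).toNat index k hk, b_data index k ((k - 1).toNat + 1) hk2] at hlist
  rw [pvRaw_snoc, List.map_append] at hlist
  set q := pvIter index (k - 1).toNat with hq
  have hqe : q = PySem.Int.floordiv index (4 ^ (k - 1).toNat) := by rw [hq, pvIter_eq]
  rw [← hqe] at hout hm3
  simp only [List.map_cons, List.map_nil, List.reverse_append, List.reverse_cons, List.reverse_nil,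
    List.nil_append, List.cons_append, List.cons.injEq] at hlist
  have hhead : pvSymA q = pvLookup (PySem.Int.mod q 4) := hlist.1
  have hA : pvSymA q = 'T' := by
    unfold pvSymA
    rw [if_neg (by omega), if_neg (by omega), if_neg (by omega)]
  obtain ⟨hm0, hm4⟩ := mod4_bounds q
  have : PySem.Int.mod q 4 = 0 ∨ PySem.Int.mod q 4 = 1 ∨ PySem.Int.mod q 4 = 2 := by omega
  rcases this with h | h | h <;> rw [h, hA] at hhead <;> exact absurd hhead (by decide)
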